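-- pv_equiv track=rewrite | github.com/thepratholic/Competitive-Programming | LeetCode/Biweekly Contest 166/Distinct Points Reachable After Substring Removal.py | distinctPoints
-- ===== SOURCE A (Python) =====
-- def distinctPoints(s: str, k: int) -> int:
--     seen = {(0, 0)}
--     x = y = 0
--     for i in range(k, len(s)):
--         if s[i] == 'U': y += 1
--         if s[i] == 'D': y -= 1
--         if s[i] == 'L': x -= 1
--         if s[i] == 'R': x += 1
--
--         if s[i - k] == 'U': y -= 1
--         if s[i - k] == 'D': y += 1
--         if s[i - k] == 'L': x += 1
--         if s[i - k] == 'R': x -= 1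
--
--         seen.add((x, y))
--     return len(seen)
-- ===== SOURCE B (Python) =====
-- def distinctPoints(s: str, k: int) -> int:
--     n = len(s)
--     # prefix displacement points: pref[t] = position after executing s[:t]
--     pref = [(0, 0)]
--     x = y = 0
--     for c in s:
--         if c == 'U': y += 1
--         elif c == 'D': y -= 1
--         elif c == 'L': x -= 1
--         elif c == 'R': x += 1
--         pref.append((x, y))
--     ends = set()
--     for j in range(n - k + 1):
--         sx, sy = pref[j]
--         ex, ey = pref[j + k]
--         # endpoint after removing s[j:j+k]: total walk minus the window's displacement
--         ends.add((x - ex + sx, y - ey + sy))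
--     return max(len(ends), 1)
-- ===== Notes on version B (the rewrite author's own statement) =====
-- stated objective: alternative
-- what changed: B replaces A's incremental sliding-window state update with a precomputed prefix-displacement table and computes each removal endpoint by two direct table lookups (total walk minus the window's displacement), collecting them in a set.
import Mathlib
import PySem

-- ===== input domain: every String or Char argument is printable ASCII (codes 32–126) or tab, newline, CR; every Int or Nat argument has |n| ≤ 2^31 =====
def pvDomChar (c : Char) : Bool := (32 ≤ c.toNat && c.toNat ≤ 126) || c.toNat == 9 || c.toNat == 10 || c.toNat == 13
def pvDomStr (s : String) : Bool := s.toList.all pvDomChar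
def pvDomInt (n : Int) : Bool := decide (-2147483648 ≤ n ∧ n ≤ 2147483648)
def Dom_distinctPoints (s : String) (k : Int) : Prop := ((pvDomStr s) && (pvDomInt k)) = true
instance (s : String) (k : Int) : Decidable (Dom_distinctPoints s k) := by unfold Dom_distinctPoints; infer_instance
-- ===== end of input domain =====

-- B replaces A's incremental sliding-window update with a prefix-displacement table and
-- per-window direct lookups (alternative decomposition, same asymptotic cost).

-- ===== PORT A =====
-- A's loop body: reads s[i] and s[i-k], updates (x, y), adds the point to seen.
def stepA (s : String) (k : Int) (st : Int × Int × PySem.Set (Int × Int)) (i : Int) :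
    Int × Int × PySem.Set (Int × Int) :=
  match PySem.Str.pyGet? s i, PySem.Str.pyGet? s (i - k) with
  | some c, some d =>
    let x := st.1
    let y := st.2.1
    let seen := st.2.2
    let y := if c = 'U' then y + 1 else y
    let y := if c = 'D' then y - 1 else y
    let x := if c = 'L' then x - 1 else x
    let x := if c = 'R' then x + 1 else x
    let y := if d = 'U' then y - 1 else y
    let y := if d = 'D' then y + 1 else y
    let x := if d = 'L' then x + 1 else x
    let x := if d = 'R' then x - 1 else x
    (x, y, PySem.Set.add seen (x, y))
  | _, _ => st  -- unreachable for 0 ≤ k (Python raises IndexError there; excluded by Pre_)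

def distinctPoints (s : String) (k : Int) : Int :=
  PySem.Set.len
    (((PySem.List.pyRange k (PySem.Str.len s) 1).foldl (stepA s k)
      (0, 0, PySem.Set.ofList [((0 : Int), (0 : Int))])).2.2)

-- ===== PORT B =====
-- B's first loop: advance (x, y) by the move of c, append the new point to pref.
def stepPref (st : Int × Int × List (Int × Int)) (c : Char) : Int × Int × List (Int × Int) :=
  let x := st.1
  let y := st.2.1
  let pref := st.2.2
  let p := if c = 'U' then (x, y + 1)
           else if c = 'D' then (x, y - 1)
           else if c = 'L' then (x - 1, y)
           else if c = 'R' then (x + 1, y)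
           else (x, y)
  (p.1, p.2, pref ++ [p])

def distinctPoints_alt (s : String) (k : Int) : Int :=
  match s.toList.foldl stepPref (0, 0, [((0 : Int), (0 : Int))]) with
  | (x, y, pref) =>
    max (PySem.Set.len ((PySem.List.pyRange 0 (PySem.Str.len s - k + 1) 1).foldl
      (fun (e : PySem.Set (Int × Int)) j =>
        PySem.Set.add e
          (x - (PySem.List.pyGetD pref (j + k) ((0 : Int), (0 : Int))).1
              + (PySem.List.pyGetD pref j ((0 : Int), (0 : Int))).1,
           y - (PySem.List.pyGetD pref (j + k) ((0 : Int), (0 : Int))).2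
              + (PySem.List.pyGetD pref j ((0 : Int), (0 : Int))).2))
      PySem.Set.empty)) 1

-- ===== PRECONDITION & SPEC =====
-- Pre_ excludes k < 0, on which A always raises IndexError (i - k runs past the end of s,
-- or a negative i falls below -len(s)).
def Pre_distinctPoints (s : String) (k : Int) : Prop := 0 ≤ k
instance (s : String) (k : Int) : Decidable (Pre_distinctPoints s k) := by
  unfold Pre_distinctPoints; infer_instance

def pvWitness_distinctPoints : String × Int := ("UDLRUD", 2)

def Spec_distinctPoints (s : String) (k : Int) (out : Int) : Prop := out = distinctPoints_alt s k
instance (s : String) (k : Int) (out : Int) : Decidable (Spec_distinctPoints s k out) := by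
  unfold Spec_distinctPoints; infer_instance

-- ===== CLAIM (what is proved, stated in full; the proofs are below) =====
def Claim_equal_distinctPoints : Prop := ∀ (s : String) (k : Int),
  Dom_distinctPoints s k → Pre_distinctPoints s k → Spec_distinctPoints s k (distinctPoints s k)

-- ===== LEMMAS AND PROOFS =====

-- displacement of one move
def pvDx (c : Char) : Int := if c = 'R' then 1 else if c = 'L' then -1 else 0
def pvDy (c : Char) : Int := if c = 'U' then 1 else if c = 'D' then -1 else 0
-- displacement of a whole walk
def pvSx (l : List Char) : Int := (l.map pvDx).sum
def pvSy (l : List Char) : Int := (l.map pvDy).sum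
-- prefix displacement: position after executing the first t moves of cs
def pvP (cs : List Char) (t : Nat) : Int × Int := (pvSx (cs.take t), pvSy (cs.take t))
-- A's sliding state after j iterations (window start j, window length k)
def pvVA (cs : List Char) (K j : Nat) : Int × Int :=
  ((pvP cs (j + K)).1 - (pvP cs j).1 - (pvP cs K).1,
   (pvP cs (j + K)).2 - (pvP cs j).2 - (pvP cs K).2)
-- B's endpoint after removing the window starting at j
def pvEB (cs : List Char) (K j : Nat) : Int × Int :=
  (pvSx cs - (pvP cs (j + K)).1 + (pvP cs j).1,
   pvSy cs - (pvP cs (j + K)).2 + (pvP cs j).2)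

lemma pvP_succ (cs : List Char) (t : Nat) (ht : t < cs.length) :
    pvP cs (t + 1) = ((pvP cs t).1 + pvDx (cs.getD t ' '), (pvP cs t).2 + pvDy (cs.getD t ' ')) := by
  have hd : cs.getD t ' ' = cs[t] := List.getD_eq_getElem cs ' ' ht
  have h : cs.take (t + 1) = cs.take t ++ [cs[t]] := by
    rw [List.take_add_one, List.getElem?_eq_getElem ht]; rfl
  rw [hd]
  simp only [pvP, h, pvSx, pvSy, List.map_append, List.sum_append, List.map_cons, List.map_nil,
    List.sum_cons, List.sum_nil, add_zero]

lemma chainX (x : Int) (c d : Char) :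
    (let x1 := if c = 'L' then x - 1 else x
     let x2 := if c = 'R' then x1 + 1 else x1
     let x3 := if d = 'L' then x2 + 1 else x2
     if d = 'R' then x3 - 1 else x3) = x + pvDx c - pvDx d := by
  simp only [pvDx]; split_ifs <;> simp_all <;> omega

lemma chainY (y : Int) (c d : Char) :
    (let y1 := if c = 'U' then y + 1 else y
     let y2 := if c = 'D' then y1 - 1 else y1
     let y3 := if d = 'U' then y2 - 1 else y2
     if d = 'D' then y3 + 1 else y3) = y + pvDy c - pvDy d := by
  simp only [pvDy]; split_ifs <;> simp_all <;> omega

lemma stepA_some (s : String) (k : Int) (x y : Int) (S : PySem.Set (Int × Int)) (i : Int)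
    (c d : Char) (hc : PySem.Str.pyGet? s i = some c) (hd : PySem.Str.pyGet? s (i - k) = some d) :
    stepA s k (x, y, S) i =
      (x + pvDx c - pvDx d, y + pvDy c - pvDy d,
        PySem.Set.add S (x + pvDx c - pvDx d, y + pvDy c - pvDy d)) := by
  simp only [stepA, hc, hd, chainX, chainY]

lemma stepA_eq (s : String) (k : Int) (K m : Nat) (hk : k = (K : Int))
    (hm : K + m < s.toList.length) (S : PySem.Set (Int × Int)) :
    stepA s k (((pvVA s.toList K m).1, (pvVA s.toList K m).2, S)) ((K : Int) + (m : Int)) =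
      ((pvVA s.toList K (m + 1)).1, (pvVA s.toList K (m + 1)).2,
        PySem.Set.add S (pvVA s.toList K (m + 1))) := by
  have hm' : m < s.toList.length := by omega
  have hc : PySem.Str.pyGet? s ((K : Int) + (m : Int)) = some (s.toList.getD (K + m) ' ') := by
    have e : ((K : Int) + (m : Int)) = ((K + m : Nat) : Int) := by push_cast; ring
    rw [e, PySem.Str.pyGet?_natCast, List.getElem?_eq_getElem hm,
      List.getD_eq_getElem s.toList ' ' hm]
  have hd : PySem.Str.pyGet? s ((K : Int) + (m : Int) - k) = some (s.toList.getD m ' ') := by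
    have e : ((K : Int) + (m : Int) - k) = ((m : Nat) : Int) := by rw [hk]; ring
    rw [e, PySem.Str.pyGet?_natCast, List.getElem?_eq_getElem hm',
      List.getD_eq_getElem s.toList ' ' hm']
  rw [stepA_some s k _ _ S _ _ _ hc hd]
  have h1 := pvP_succ s.toList (K + m) hm
  have h2 := pvP_succ s.toList m hm'
  have e1 : m + 1 + K = K + m + 1 := by omega
  have e2 : m + K = K + m := by omega
  have hx : (pvVA s.toList K m).1 + pvDx (s.toList.getD (K + m) ' ')
      - pvDx (s.toList.getD m ' ') = (pvVA s.toList K (m + 1)).1 := by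
    simp [pvVA, e1, e2, h1, h2]
    try ring
  have hy : (pvVA s.toList K m).2 + pvDy (s.toList.getD (K + m) ' ')
      - pvDy (s.toList.getD m ' ') = (pvVA s.toList K (m + 1)).2 := by
    simp [pvVA, e1, e2, h1, h2]
    try ring
  rw [hx, hy]

-- A's fold over the first M indices of the range
lemma foldA (s : String) (k : Int) (K : Nat) (hk : k = (K : Int)) (S0 : PySem.Set (Int × Int)) :
    ∀ (M : Nat), K + M ≤ s.toList.length →
    (List.range M).foldl (fun st (m : Nat) => stepA s k st ((K : Int) + (m : Int)))
        ((pvVA s.toList K 0).1, (pvVA s.toList K 0).2, S0) =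
      ((pvVA s.toList K M).1, (pvVA s.toList K M).2,
        ((List.range M).map (fun m => pvVA s.toList K (m + 1))).foldl PySem.Set.add S0) := by
  intro M
  induction M with
  | zero => intro _; simp
  | succ M ih =>
    intro hM
    rw [List.range_succ, List.foldl_append, ih (by omega), List.map_append, List.foldl_append]
    simp only [List.foldl_cons, List.foldl_nil]
    rw [stepA_eq s k K M hk (by omega)]
    simp

lemma pvSx_append (u v : List Char) : pvSx (u ++ v) = pvSx u + pvSx v := by simp [pvSx]
lemma pvSy_append (u v : List Char) : pvSy (u ++ v) = pvSy u + pvSy v := by simp [pvSy]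

lemma chainB (x y : Int) (c : Char) :
    (if c = 'U' then (x, y + 1) else if c = 'D' then (x, y - 1)
     else if c = 'L' then (x - 1, y) else if c = 'R' then (x + 1, y) else (x, y))
      = (x + pvDx c, y + pvDy c) := by
  simp only [pvDx, pvDy]; split_ifs <;> simp_all <;> ring

-- B's prefix loop, generalized over the already-consumed prefix u
lemma foldPref (cs : List Char) : ∀ (u : List Char) (P : List (Int × Int)),
    cs.foldl stepPref (pvSx u, pvSy u, P) =
      (pvSx (u ++ cs), pvSy (u ++ cs),
        P ++ (List.range cs.length).map
          (fun t => (pvSx (u ++ cs.take (t + 1)), pvSy (u ++ cs.take (t + 1))))) := by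
  induction cs with
  | nil => intro u P; simp
  | cons c cs ih =>
    intro u P
    have hstep : stepPref (pvSx u, pvSy u, P) c =
        (pvSx (u ++ [c]), pvSy (u ++ [c]), P ++ [(pvSx (u ++ [c]), pvSy (u ++ [c]))]) := by
      simp only [stepPref, chainB, pvSx_append, pvSy_append]
      simp [pvSx, pvSy]
    rw [List.foldl_cons, hstep, ih (u ++ [c]) (P ++ [(pvSx (u ++ [c]), pvSy (u ++ [c]))])]
    simp only [List.length_cons, List.range_succ_eq_map, List.map_cons, List.map_map]
    simp [Function.comp_def, List.append_assoc]

lemma foldPref_nil (cs : List Char) :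
    cs.foldl stepPref (0, 0, [((0 : Int), (0 : Int))]) =
      (pvSx cs, pvSy cs, (List.range (cs.length + 1)).map (fun t => pvP cs t)) := by
  have h0x : (0 : Int) = pvSx [] := by simp [pvSx]
  have h0y : (0 : Int) = pvSy [] := by simp [pvSy]
  rw [show ((0 : Int), (0 : Int), [((0 : Int), (0 : Int))]) =
      (pvSx [], pvSy [], [((0 : Int), (0 : Int))]) by rw [← h0x, ← h0y]]
  rw [foldPref cs [] [((0 : Int), (0 : Int))]]
  simp only [List.nil_append, List.range_succ_eq_map, List.map_cons, List.map_map]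
  simp [pvP, Function.comp_def, pvSx, pvSy]

-- folding Set.add commutes with an injective map
lemma foldAdd_map (f : Int × Int → Int × Int) (hf : Function.Injective f) :
    ∀ (l : List (Int × Int)) (S : PySem.Set (Int × Int)),
      (l.map f).foldl PySem.Set.add (S.map f) = (l.foldl PySem.Set.add S).map f := by
  intro l
  induction l with
  | nil => intro S; simp
  | cons a l ih =>
    intro S
    have hmem : PySem.Set.contains (S.map f) (f a) = PySem.Set.contains S a := by
      simp only [PySem.Set.contains]
      by_cases h : a ∈ S
      · simp [h, List.mem_map_of_injective hf]
      · simp [h, List.mem_map_of_injective hf]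
    have hadd : PySem.Set.add (S.map f) (f a) = (PySem.Set.add S a).map f := by
      simp only [PySem.Set.add, hmem]
      split_ifs <;> simp
    rw [List.map_cons, List.foldl_cons, List.foldl_cons, hadd, ih]

lemma foldAdd_length_le : ∀ (l : List (Int × Int)) (S : PySem.Set (Int × Int)),
    S.length ≤ (l.foldl PySem.Set.add S).length := by
  intro l
  induction l with
  | nil => intro S; simp
  | cons a l ih =>
    intro S
    rw [List.foldl_cons]
    refine le_trans ?_ (ih (PySem.Set.add S a))
    simp only [PySem.Set.add]
    split_ifs <;> simp

-- characterization of each side's final set, for 0 ≤ k = K, as a list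
lemma seenA_eq (s : String) (k : Int) (K : Nat) (hk : k = (K : Int)) :
    distinctPoints s k =
      (((List.range (s.toList.length - K + 1)).map (fun j => pvVA s.toList K j)).foldl
        PySem.Set.add PySem.Set.empty).length := by
  by_cases hKN : K ≤ s.toList.length
  · have hM : ((PySem.Str.len s : Int) - k).toNat = s.toList.length - K := by
      rw [PySem.Str.len_eq, hk]; omega
    have hrange : PySem.List.pyRange k (PySem.Str.len s) 1 =
        (List.range (s.toList.length - K)).map (fun m : Nat => (K : Int) + (m : Int)) := by
      rw [PySem.List.pyRange_one, hM, hk]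
    have hv0 : pvVA s.toList K 0 = (0, 0) := by simp [pvVA, pvP, pvSx, pvSy]
    have hsplit : (List.range (s.toList.length - K + 1)).map (fun j => pvVA s.toList K j) =
        pvVA s.toList K 0 :: ((List.range (s.toList.length - K)).map (fun m => pvVA s.toList K (m + 1))) := by
      rw [List.range_succ_eq_map]; simp [List.map_map, Function.comp_def]
    unfold distinctPoints
    rw [hrange,
      show ((0 : Int), (0 : Int), PySem.Set.ofList [((0 : Int), (0 : Int))]) =
        ((pvVA s.toList K 0).1, (pvVA s.toList K 0).2,
          PySem.Set.ofList [((0 : Int), (0 : Int))]) by rw [hv0]]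
    conv_lhs => rw [List.foldl_map]
    rw [foldA s k K hk _ _ (by omega)]
    simp only [PySem.Set.len]
    congr 1
    rw [hsplit, List.foldl_cons, hv0]
    rfl
  · have hA : PySem.List.pyRange k (PySem.Str.len s) 1 = [] := by
      rw [PySem.List.pyRange_one, PySem.Str.len_eq, hk,
        show (((s.toList.length : Nat) : Int) - ((K : Nat) : Int)).toNat = 0 by omega]
      rfl
    have hr1 : s.toList.length - K + 1 = 1 := by omega
    have hv0 : pvVA s.toList K 0 = (0, 0) := by
      simp [pvVA, pvP, pvSx, pvSy]
    unfold distinctPoints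
    rw [hA, hr1]
    simp [hv0, PySem.Set.len]
    rfl

lemma endsB_eq (s : String) (k : Int) (K : Nat) (hk : k = (K : Int)) (hKN : K ≤ s.toList.length) :
    distinctPoints_alt s k =
      max ((((List.range (s.toList.length - K + 1)).map (fun j => pvEB s.toList K j)).foldl
        PySem.Set.add PySem.Set.empty).length : Int) 1 := by
  have hn : (PySem.Str.len s - k + 1) = ((s.toList.length - K + 1 : Nat) : Int) := by
    rw [PySem.Str.len_eq, hk]; push_cast; omega
  have hrange : PySem.List.pyRange 0 (PySem.Str.len s - k + 1) 1 =
      (List.range (s.toList.length - K + 1)).map (fun j : Nat => (j : Int)) := by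
    rw [hn, PySem.List.pyRange_zero_nat]
  unfold distinctPoints_alt
  rw [foldPref_nil s.toList]
  simp only [hrange, PySem.Set.len]
  rw [← List.foldl_map, List.map_map]
  congr 2
  refine congrArg List.length (congrArg (List.foldl PySem.Set.add PySem.Set.empty) ?_)
  apply List.map_congr_left
  intro j hj
  rw [List.mem_range] at hj
  have hjK : j + K < s.toList.length + 1 := by omega
  have hj' : j < s.toList.length + 1 := by omega
  have hg1 : PySem.List.pyGetD ((List.range (s.toList.length + 1)).map (fun t => pvP s.toList t))
      ((j : Nat) : Int) ((0 : Int), (0 : Int)) = pvP s.toList j := by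
    rw [PySem.List.pyGetD_natCast, PySem.List.getD_map_range _ _ _ _ hj']
  have hg2 : PySem.List.pyGetD ((List.range (s.toList.length + 1)).map (fun t => pvP s.toList t))
      (((j : Nat) : Int) + k) ((0 : Int), (0 : Int)) = pvP s.toList (j + K) := by
    rw [hk, show (((j : Nat) : Int) + ((K : Nat) : Int)) = ((j + K : Nat) : Int) by push_cast; ring,
      PySem.List.pyGetD_natCast, PySem.List.getD_map_range _ _ _ _ hjK]
  simp only [Function.comp_def, hg1, hg2, pvEB]

lemma big_case (s : String) (k : Int) (K : Nat) (hk : k = (K : Int)) (hKN : s.toList.length < K) :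
    distinctPoints s k = 1 ∧ distinctPoints_alt s k = 1 := by
  have hA : PySem.List.pyRange k (PySem.Str.len s) 1 = [] := by
    rw [PySem.List.pyRange_one, PySem.Str.len_eq, hk,
      show (((s.toList.length : Nat) : Int) - ((K : Nat) : Int)).toNat = 0 by omega]
    rfl
  have hB : PySem.List.pyRange 0 (PySem.Str.len s - k + 1) 1 = [] := by
    rw [PySem.List.pyRange_one, PySem.Str.len_eq, hk,
      show ((((s.toList.length : Nat) : Int) - ((K : Nat) : Int) + 1) - 0).toNat = 0 by omega]
    rfl
  constructor
  · unfold distinctPoints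
    rw [hA]
    rfl
  · unfold distinctPoints_alt
    rw [hB]
    rfl

-- ===== VERDICT (by name: the statement is the Claim_ definition above) =====
theorem distinctPoints_spec : Claim_equal_distinctPoints := by
  intro s k _ hpre
  unfold Spec_distinctPoints
  have hk : k = ((k.toNat : Nat) : Int) := (Int.toNat_of_nonneg hpre).symm
  by_cases hKN : k.toNat ≤ s.toList.length
  · rw [seenA_eq s k k.toNat hk, endsB_eq s k k.toNat hk hKN]
    have hinj : Function.Injective (fun p : Int × Int =>
        (pvSx s.toList - (pvP s.toList k.toNat).1 - p.1,
         pvSy s.toList - (pvP s.toList k.toNat).2 - p.2)) := by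
      intro a b h
      simp only [Prod.mk.injEq] at h
      exact Prod.ext (by omega) (by omega)
    have hmap : (List.range (s.toList.length - k.toNat + 1)).map (fun j => pvEB s.toList k.toNat j)
        = ((List.range (s.toList.length - k.toNat + 1)).map (fun j => pvVA s.toList k.toNat j)).map
            (fun p : Int × Int =>
              (pvSx s.toList - (pvP s.toList k.toNat).1 - p.1,
               pvSy s.toList - (pvP s.toList k.toNat).2 - p.2)) := by
      rw [List.map_map]
      apply List.map_congr_left
      intro j _
      simp only [Function.comp_def, pvEB, pvVA]
      apply Prod.ext <;> simp <;> ring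
    have key : (((List.range (s.toList.length - k.toNat + 1)).map
          (fun j => pvEB s.toList k.toNat j)).foldl PySem.Set.add PySem.Set.empty)
        = ((((List.range (s.toList.length - k.toNat + 1)).map
          (fun j => pvVA s.toList k.toNat j)).foldl PySem.Set.add PySem.Set.empty).map
            (fun p : Int × Int =>
              (pvSx s.toList - (pvP s.toList k.toNat).1 - p.1,
               pvSy s.toList - (pvP s.toList k.toNat).2 - p.2))) := by
      rw [hmap]
      exact foldAdd_map _ hinj
        ((List.range (s.toList.length - k.toNat + 1)).map (fun j => pvVA s.toList k.toNat j))
        PySem.Set.empty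
    rw [key, List.length_map]
    have hsplit : (List.range (s.toList.length - k.toNat + 1)).map (fun j => pvVA s.toList k.toNat j) =
        pvVA s.toList k.toNat 0 ::
          ((List.range (s.toList.length - k.toNat)).map (fun m => pvVA s.toList k.toNat (m + 1))) := by
      rw [List.range_succ_eq_map]; simp [List.map_map, Function.comp_def]
    have h1 : 1 ≤ (((List.range (s.toList.length - k.toNat + 1)).map
        (fun j => pvVA s.toList k.toNat j)).foldl PySem.Set.add PySem.Set.empty).length := by
      rw [hsplit, List.foldl_cons]
      refine le_trans ?_ (foldAdd_length_le _ (PySem.Set.add PySem.Set.empty (pvVA s.toList k.toNat 0)))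
      rfl
    omega
  · obtain ⟨h1, h2⟩ := big_case s k k.toNat hk (by omega)
    rw [h1, h2]
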